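-- pv_equiv track=rewrite | github.com/torbeneims/ddfd | intmaker.py | build_hash_maps
-- ===== SOURCE A (Python) =====
-- def build_hash_maps(data, delimiter):
--     hash_maps = {}
--     for row in data:
--         for col_idx, value in enumerate(row):
--             if col_idx not in hash_maps:
--                 hash_maps[col_idx] = {}
--             if value not in hash_maps[col_idx]:
--                 hash_maps[col_idx][value] = len(hash_maps[col_idx])
--     return hash_maps
-- ===== SOURCE B (Python) =====
-- def build_hash_maps(data, delimiter):
--     # Gather pass: collect every column's values in encounter order.
--     columns = {}
--     for row in data:
--         for col_idx, value in enumerate(row):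
--             columns.setdefault(col_idx, []).append(value)
--     # Assignment pass: dedupe each column (first-occurrence order) and enumerate.
--     return {col: {v: i for i, v in enumerate(dict.fromkeys(vals))}
--             for col, vals in columns.items()}
-- ===== Notes on version B (the rewrite author's own statement) =====
-- stated objective: alternative
-- what changed: B splits A's interleaved build into two passes: a gather pass collecting each column's values, then a separate dedupe-and-enumerate pass (dict.fromkeys) that assigns ids, instead of checking membership and assigning ids inline per cell.
import Mathlib
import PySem

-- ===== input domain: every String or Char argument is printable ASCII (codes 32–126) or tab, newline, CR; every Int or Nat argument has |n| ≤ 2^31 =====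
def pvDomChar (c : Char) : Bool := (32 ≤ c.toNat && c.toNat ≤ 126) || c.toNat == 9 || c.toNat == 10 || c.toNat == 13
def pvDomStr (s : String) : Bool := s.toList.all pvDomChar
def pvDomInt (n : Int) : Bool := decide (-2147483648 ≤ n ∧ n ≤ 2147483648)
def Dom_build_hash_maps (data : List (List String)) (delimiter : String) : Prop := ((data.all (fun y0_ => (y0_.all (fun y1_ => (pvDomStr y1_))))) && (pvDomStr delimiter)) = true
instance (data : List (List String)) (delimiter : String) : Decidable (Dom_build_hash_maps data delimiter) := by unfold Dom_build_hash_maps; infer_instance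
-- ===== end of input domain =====

-- B replaces A's interleaved membership-check-and-assign loop by a gather pass plus a
-- separate dedupe-and-enumerate pass (alternative decomposition, similar cost).

-- ===== PORT A =====
-- one cell of A's loop body: ensure the column dict exists, then assign a fresh id if the value is new
def pvStepA (hm : PySem.Dict Int (PySem.Dict String Int)) (p : Int × String) :
    PySem.Dict Int (PySem.Dict String Int) :=
  let hm := if hm.contains p.1 then hm else hm.insert p.1 (PySem.Dict.mk [])
  let col := hm.getD p.1 (PySem.Dict.mk [])
  if col.contains p.2 then hm else hm.insert p.1 (col.insert p.2 (col.size : Int))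

def build_hash_maps (data : List (List String)) (delimiter : String) :
    List (Int × List (String × Int)) :=
  let hm := data.foldl (fun hm row => (PySem.List.enumerate row).foldl pvStepA hm) (PySem.Dict.mk [])
  hm.items.map (fun p => (p.1, p.2.items))

-- ===== PORT B =====
-- gather pass body: columns.setdefault(col_idx, []).append(value)
def pvGather (cs : PySem.Dict Int (List String)) (p : Int × String) :
    PySem.Dict Int (List String) :=
  cs.modify p.1 [] (fun l => l ++ [p.2])

-- {v: i for i, v in enumerate(dict.fromkeys(vals))}: keys are pairwise distinct
-- (dedup), so the dict comprehension's items are exactly this pair list.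
def pvAssign (vals : List String) : List (String × Int) :=
  (PySem.List.enumerate (PySem.List.dedup vals)).map (fun q => (q.2, q.1))

def build_hash_maps_alt (data : List (List String)) (delimiter : String) :
    List (Int × List (String × Int)) :=
  let columns := data.foldl (fun cs row => (PySem.List.enumerate row).foldl pvGather cs) (PySem.Dict.mk [])
  columns.items.map (fun p => (p.1, pvAssign p.2))

-- ===== PRECONDITION & SPEC =====
def Spec_build_hash_maps (data : List (List String)) (delimiter : String) (out : List (Int × List (String × Int))) : Prop := out = build_hash_maps_alt data delimiter
instance (data : List (List String)) (delimiter : String) (out : List (Int × List (String × Int))) : Decidable (Spec_build_hash_maps data delimiter out) := by unfold Spec_build_hash_maps; infer_instance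

-- ===== CLAIM (what is proved, stated in full; the proofs are below) =====
def Claim_equal_build_hash_maps : Prop := ∀ (data : List (List String)) (delimiter : String), Dom_build_hash_maps data delimiter → Spec_build_hash_maps data delimiter (build_hash_maps data delimiter)

-- ===== LEMMAS AND PROOFS =====

-- abstraction: the finished id-dict that A will have built for a column whose gathered values are `vals`
def pvF (cs : PySem.Dict Int (List String)) : PySem.Dict Int (PySem.Dict String Int) :=
  PySem.Dict.mk (cs.items.map (fun p => (p.1, PySem.Dict.mk (pvAssign p.2))))

theorem pvAssign_append (l : List String) (v : String) :
    pvAssign (l ++ [v]) =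
      if (PySem.List.dedup l).contains v then pvAssign l
      else pvAssign l ++ [(v, ((PySem.List.dedup l).length : Int))] := by
  have hd : PySem.List.dedup (l ++ [v]) =
      if (PySem.List.dedup l).contains v then PySem.List.dedup l else PySem.List.dedup l ++ [v] := by
    simp [PySem.List.dedup, PySem.Set.ofList, List.foldl_append, PySem.Set.add, PySem.Set.contains]
  unfold pvAssign
  rw [hd]
  split_ifs with h
  · rfl
  · rw [PySem.List.enumerate_append]
    simp [PySem.List.enumerate]

theorem pvF_contains (cs : PySem.Dict Int (List String)) (k : Int) :
    (pvF cs).contains k = cs.contains k := by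
  simp [pvF, PySem.Dict.contains, List.any_map, Function.comp_def]

theorem pvF_get? (cs : PySem.Dict Int (List String)) (k : Int) :
    (pvF cs).get? k = (cs.get? k).map (fun l => PySem.Dict.mk (pvAssign l)) := by
  simp [pvF, PySem.Dict.get?, List.find?_map, Function.comp_def]

theorem pvF_insert (cs : PySem.Dict Int (List String)) (k : Int) (w : List String) :
    pvF (cs.insert k w) = (pvF cs).insert k (PySem.Dict.mk (pvAssign w)) := by
  unfold PySem.Dict.insert
  rw [pvF_contains]
  unfold pvF
  split_ifs with h
  · apply PySem.Dict.ext
    simp [List.map_map, Function.comp_def]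
    intro a b _
    by_cases hk : a = k <;> simp [hk]
  · apply PySem.Dict.ext
    simp

theorem pvCol_contains (l : List String) (v : String) :
    (PySem.Dict.mk (pvAssign l)).contains v = (PySem.List.dedup l).contains v := by
  simp only [PySem.Dict.contains, pvAssign, List.any_map, Function.comp_def]
  rw [show (fun (x : Int × String) => (x.2, x.1).1 == v) = ((fun y => y == v) ∘ (fun (x : Int × String) => x.2)) from rfl]
  rw [← List.any_map, PySem.List.map_snd_enumerate, List.contains_eq_any_beq]
  simp only [BEq.comm]

theorem pvCol_size (l : List String) :
    (PySem.Dict.mk (pvAssign l)).size = (PySem.List.dedup l).length := by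
  simp [PySem.Dict.size, pvAssign, PySem.List.length_enumerate]

-- list form of re-inserting an already-held value
theorem pvReplace_eq_self {κ ν : Type} [BEq κ] [LawfulBEq κ] (l : List (κ × ν)) (k : κ) (w : ν)
    (hnd : (l.map (fun p => p.1)).Nodup)
    (h : (l.find? (fun p => p.1 == k)).map (fun p => p.2) = some w) :
    l.map (fun p => if p.1 == k then (k, w) else p) = l := by
  induction l with
  | nil => simp at h
  | cons a t ih =>
    by_cases ha : a.1 = k
    · have hkw : (k, w) = a := by
        rw [List.find?_cons_of_pos (by simp [ha])] at h
        simp only [Option.map_some, Option.some.injEq] at h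
        rw [← ha, ← h]
      simp only [List.map_cons, if_pos (by simp [ha] : (a.1 == k) = true), hkw]
      congr 1
      have hnotin : ∀ p ∈ t, (p.1 == k) = false := by
        intro p hp
        simp only [List.map_cons, List.nodup_cons] at hnd
        have hm : p.1 ∈ t.map (fun p => p.1) := List.mem_map_of_mem hp
        simp only [beq_eq_false_iff_ne]
        intro hpk
        apply hnd.1
        rw [ha, ← hpk]
        exact hm
      rw [List.map_congr_left (g := id) (fun p hp => by simp [hnotin p hp]), List.map_id]
    · rw [List.find?_cons_of_neg (by simp [ha])] at h
      simp only [List.map_cons, List.nodup_cons] at hnd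
      have hfa : (a.1 == k) = false := by simp [ha]
      simp only [List.map_cons, hfa, Bool.false_eq_true, if_false]
      rw [ih hnd.2 h]

-- a dict whose keys are nodup is unchanged by re-inserting the value it already holds
theorem pvInsert_self {κ ν : Type} [BEq κ] [LawfulBEq κ] (d : PySem.Dict κ ν) (k : κ) (w : ν)
    (hnd : (d.items.map (fun p => p.1)).Nodup) (h : d.get? k = some w) :
    d.insert k w = d := by
  have hc : d.contains k = true := by
    unfold PySem.Dict.get? at h
    unfold PySem.Dict.contains
    cases hf : d.items.find? (fun p => p.1 == k) with
    | none => rw [hf] at h; simp at h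
    | some q =>
      have := List.find?_some hf
      exact List.any_eq_true.2 ⟨q, List.mem_of_find?_eq_some hf, this⟩
  unfold PySem.Dict.insert
  rw [hc]
  apply PySem.Dict.ext
  exact pvReplace_eq_self d.items k w hnd (by unfold PySem.Dict.get? at h; exact h)

theorem pvKeys_insert {κ ν : Type} [BEq κ] [LawfulBEq κ] (d : PySem.Dict κ ν) (k : κ) (w : ν) :
    (d.insert k w).items.map (fun p => p.1) =
      if d.contains k then d.items.map (fun p => p.1) else d.items.map (fun p => p.1) ++ [k] := by
  unfold PySem.Dict.insert
  split_ifs with h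
  · dsimp only
    rw [List.map_map]
    apply List.map_congr_left
    intro p _
    by_cases hk : p.1 = k <;> simp [hk]
  · dsimp only
    simp

theorem pvGather_nodup (cs : PySem.Dict Int (List String)) (p : Int × String)
    (hnd : (cs.items.map (fun q => q.1)).Nodup) :
    ((pvGather cs p).items.map (fun q => q.1)).Nodup := by
  unfold pvGather PySem.Dict.modify
  rw [pvKeys_insert]
  split_ifs with h
  · exact hnd
  · unfold PySem.Dict.contains at h
    have hk : p.1 ∉ cs.items.map (fun q => q.1) := by
      intro hmem
      obtain ⟨q, hq, hq1⟩ := List.mem_map.1 hmem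
      exact h (List.any_eq_true.2 ⟨q, hq, by simp [hq1]⟩)
    refine hnd.append (List.nodup_singleton _) ?_
    intro a ha hb
    rw [List.mem_singleton] at hb
    exact hk (hb ▸ ha)

theorem pvStep_comm (cs : PySem.Dict Int (List String)) (p : Int × String)
    (hnd : (cs.items.map (fun q => q.1)).Nodup) :
    pvStepA (pvF cs) p = pvF (pvGather cs p) := by
  obtain ⟨k, v⟩ := p
  unfold pvStepA pvGather PySem.Dict.modify
  rw [pvF_contains]
  cases hc : cs.contains k with
  | false =>
    have hget : cs.get? k = none := by
      cases hg : cs.get? k with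
      | none => rfl
      | some l =>
        exfalso
        unfold PySem.Dict.get? at hg
        cases hf : cs.items.find? (fun p => p.1 == k) with
        | none => rw [hf] at hg; simp at hg
        | some q =>
          have := List.find?_some hf
          have : cs.contains k = true :=
            List.any_eq_true.2 ⟨q, List.mem_of_find?_eq_some hf, this⟩
          rw [hc] at this; exact absurd this (by simp)
    have h1 : PySem.Dict.getD ((pvF cs).insert k (PySem.Dict.mk [])) k (PySem.Dict.mk []) = PySem.Dict.mk [] := by
      simp [PySem.Dict.getD, PySem.Dict.get?_insert_self]
    have h2 : (PySem.Dict.mk ([] : List (String × Int))).contains v = false := rfl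
    simp only [Bool.false_eq_true, if_false, h1, h2]
    rw [PySem.Dict.insert_insert_self]
    have h3 : cs.getD k [] = [] := by simp [PySem.Dict.getD, hget]
    rw [h3, pvF_insert]
    rfl
  | true =>
    obtain ⟨l, hget⟩ : ∃ l, cs.get? k = some l := by
      unfold PySem.Dict.contains at hc
      obtain ⟨q, hq, hq1⟩ := List.any_eq_true.1 hc
      unfold PySem.Dict.get?
      cases hf : cs.items.find? (fun p => p.1 == k) with
      | none => exact absurd hq1 (by simpa using List.find?_eq_none.1 hf q hq)
      | some r => exact ⟨r.2, rfl⟩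
    have hcol : (pvF cs).getD k (PySem.Dict.mk []) = PySem.Dict.mk (pvAssign l) := by
      simp [PySem.Dict.getD, pvF_get?, hget]
    have hgetD : cs.getD k [] = l := by simp [PySem.Dict.getD, hget]
    simp only [if_true]
    rw [hcol, hgetD, pvCol_contains, pvF_insert, pvAssign_append]
    cases hcv : (PySem.List.dedup l).contains v with
    | true =>
      simp only [if_true]
      have hndF : ((pvF cs).items.map (fun p => p.1)).Nodup := by
        unfold pvF
        rw [show (PySem.Dict.mk ((cs.items.map (fun p => (p.1, PySem.Dict.mk (pvAssign p.2)))))).items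
            = cs.items.map (fun p => (p.1, PySem.Dict.mk (pvAssign p.2))) from rfl]
        rw [List.map_map]
        exact hnd
      exact (pvInsert_self (pvF cs) k (PySem.Dict.mk (pvAssign l)) hndF (by rw [pvF_get?, hget]; rfl)).symm
    | false =>
      simp only [Bool.false_eq_true, if_false]
      congr 1
      rw [show (PySem.Dict.mk (pvAssign l)).insert v ((PySem.Dict.mk (pvAssign l)).size : Int)
          = PySem.Dict.mk (pvAssign l ++ [(v, ((PySem.Dict.mk (pvAssign l)).size : Int))]) from by
        unfold PySem.Dict.insert
        rw [pvCol_contains, hcv]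
        simp]
      rw [pvCol_size]

theorem pvFold_comm (ps : List (Int × String)) (cs : PySem.Dict Int (List String))
    (hnd : (cs.items.map (fun q => q.1)).Nodup) :
    ps.foldl pvStepA (pvF cs) = pvF (ps.foldl pvGather cs) ∧
      (((ps.foldl pvGather cs).items.map (fun q => q.1)).Nodup) := by
  induction ps generalizing cs with
  | nil => exact ⟨rfl, hnd⟩
  | cons p ps ih =>
    have h1 := pvStep_comm cs p hnd
    have h2 := pvGather_nodup cs p hnd
    simpa [List.foldl_cons, h1] using ih (pvGather cs p) h2

theorem pvRows_comm (rows : List (List String)) (cs : PySem.Dict Int (List String))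
    (hnd : (cs.items.map (fun q => q.1)).Nodup) :
    rows.foldl (fun hm row => (PySem.List.enumerate row).foldl pvStepA hm) (pvF cs) =
      pvF (rows.foldl (fun cs row => (PySem.List.enumerate row).foldl pvGather cs) cs) ∧
      (((rows.foldl (fun cs row => (PySem.List.enumerate row).foldl pvGather cs) cs).items.map (fun q => q.1)).Nodup) := by
  induction rows generalizing cs with
  | nil => exact ⟨rfl, hnd⟩
  | cons r rows ih =>
    obtain ⟨h1, h2⟩ := pvFold_comm (PySem.List.enumerate r) cs hnd
    simpa [List.foldl_cons, h1] using ih _ h2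

-- ===== VERDICT (by name: the statement is the Claim_ definition above) =====
theorem build_hash_maps_spec : Claim_equal_build_hash_maps := by
  intro data delimiter _
  show _ = _
  unfold build_hash_maps build_hash_maps_alt
  have h0 : (((PySem.Dict.mk ([] : List (Int × List String))).items.map (fun q => q.1)).Nodup) := by simp
  obtain ⟨h1, _⟩ := pvRows_comm data (PySem.Dict.mk []) h0
  have he : pvF (PySem.Dict.mk []) = PySem.Dict.mk [] := rfl
  rw [he] at h1
  rw [h1]
  simp [pvF, List.map_map, Function.comp]
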